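-- pv_equiv track=rewrite | github.com/zhiqin1998/interpolation_assignment | main.py | get_polynomial_str
-- ===== SOURCE A (Python) =====
-- def get_polynomial_str(c, x):
--     ans = []
--     for i in range(len(c)):
--         curr = str(c[i])
--         if curr == '0':
--             continue
--         for j in range(i):
--             t = str(x[j])
--             if t == '0':
--                 curr += '(x)'
--             elif '-' in t:
--                 curr += '(x + {})'.format(t.replace('-', ''))
--             else:
--                 curr += '(x - {})'.format(t)
--         ans.append(curr)
--     return ' + '.join(ans)
-- ===== SOURCE B (Python) =====
-- def _factor(v):
--     t = str(v)
--     if t == '0':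
--         return '(x)'
--     if '-' in t:
--         return '(x + {})'.format(t.replace('-', ''))
--     return '(x - {})'.format(t)
--
--
-- def get_polynomial_str(c, x):
--     terms = []
--     prefix = ''
--     for i, ci in enumerate(c):
--         s = str(ci)
--         if s != '0':
--             terms.append(s + prefix)
--         if i < len(x):
--             prefix += _factor(x[i])
--     return ' + '.join(terms)
-- ===== Notes on version B (the rewrite author's own statement) =====
-- stated objective: faster
-- what changed: Instead of rebuilding the factor chain from scratch for every term with a nested loop over all earlier nodes, B makes one pass over the coefficients maintaining a running cumulative factor-string prefix, appending each new factor once.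
import Mathlib
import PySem

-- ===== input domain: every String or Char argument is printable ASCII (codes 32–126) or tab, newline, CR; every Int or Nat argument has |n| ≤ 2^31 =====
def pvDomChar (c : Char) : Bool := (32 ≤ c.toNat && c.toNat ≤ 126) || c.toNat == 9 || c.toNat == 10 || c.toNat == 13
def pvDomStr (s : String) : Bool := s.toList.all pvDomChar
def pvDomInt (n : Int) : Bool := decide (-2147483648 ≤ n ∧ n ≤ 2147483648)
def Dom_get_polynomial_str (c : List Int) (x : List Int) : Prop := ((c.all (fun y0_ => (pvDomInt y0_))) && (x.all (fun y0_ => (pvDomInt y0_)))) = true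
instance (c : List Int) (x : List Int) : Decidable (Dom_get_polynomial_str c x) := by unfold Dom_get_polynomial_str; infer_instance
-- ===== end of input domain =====

-- B replaces A's nested re-derivation of all earlier factors per term by a single pass that
-- maintains a running cumulative factor-string prefix (measured asymptotically faster).


-- ===== PORT A =====
def get_polynomial_str (c : List Int) (x : List Int) : String :=
  let ans : List String :=
    (PySem.List.pyRange 0 (c.length : Int) 1).foldl (fun ans i =>
      let curr := PySem.Int.toStr (PySem.List.pyGetD c i 0)
      if curr == "0" then ans
      else
        let curr := (PySem.List.pyRange 0 i 1).foldl (fun curr j =>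
          let t := PySem.Int.toStr (PySem.List.pyGetD x j 0)
          if t == "0" then curr ++ "(x)"
          else if PySem.Str.isIn "-" t then curr ++ "(x + " ++ PySem.Str.replace t "-" "" ++ ")"
          else curr ++ "(x - " ++ t ++ ")") curr
        ans ++ [curr]) []
  PySem.Str.join " + " ans

-- ===== PORT B =====
-- B's helper _factor
def pvFactor (v : Int) : String :=
  let t := PySem.Int.toStr v
  if t == "0" then "(x)"
  else if PySem.Str.isIn "-" t then "(x + " ++ PySem.Str.replace t "-" "" ++ ")"
  else "(x - " ++ t ++ ")"

def get_polynomial_str_alt (c : List Int) (x : List Int) : String :=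
  let st :=
    (PySem.List.enumerate c).foldl (fun (st : List String × String) p =>
      let s := PySem.Int.toStr p.2
      let terms := if s == "0" then st.1 else st.1 ++ [s ++ st.2]
      let prefx := if p.1 < (x.length : Int) then st.2 ++ pvFactor (PySem.List.pyGetD x p.1 0) else st.2
      (terms, prefx)) (([] : List String), "")
  PySem.Str.join " + " st.1

-- ===== PRECONDITION & SPEC =====
-- A raises IndexError when some nonzero coefficient c[i] has i > len(x) (its inner loop reads x[i-1]);
-- Pre_ excludes exactly those inputs.
def Pre_get_polynomial_str (c : List Int) (x : List Int) : Prop :=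
  ∀ i : Nat, i < c.length → c.getD i 0 ≠ 0 → i ≤ x.length
instance (c : List Int) (x : List Int) : Decidable (Pre_get_polynomial_str c x) := by
  unfold Pre_get_polynomial_str; infer_instance
def pvWitness_get_polynomial_str : List Int × List Int := ([1, 0, -2], [3, -1])
def Spec_get_polynomial_str (c : List Int) (x : List Int) (out : String) : Prop := out = get_polynomial_str_alt c x
instance (c : List Int) (x : List Int) (out : String) : Decidable (Spec_get_polynomial_str c x out) := by unfold Spec_get_polynomial_str; infer_instance

-- ===== CLAIM (what is proved, stated in full; the proofs are below) =====
def Claim_equal_get_polynomial_str : Prop := ∀ (c : List Int) (x : List Int), Dom_get_polynomial_str c x → Pre_get_polynomial_str c x → Spec_get_polynomial_str c x (get_polynomial_str c x)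

-- ===== LEMMAS AND PROOFS =====

-- concatenation of a list of strings
def pvCat (l : List String) : String := l.foldl (· ++ ·) ""

-- the reference term list: one term per nonzero coefficient, carrying the factors of the nodes before it
def pvTerms (x : List Int) : List Int → Nat → List String
  | [], _ => []
  | v :: r, k =>
    (if PySem.Int.toStr v == "0" then []
     else [PySem.Int.toStr v ++ pvCat ((x.take k).map pvFactor)]) ++ pvTerms x r (k + 1)

theorem pvCat_append (l : List String) (s : String) :
    pvCat (l ++ [s]) = pvCat l ++ s := by
  show List.foldl (· ++ ·) "" (l ++ [s]) = pvCat l ++ s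
  rw [List.foldl_append]
  simp only [List.foldl_cons, List.foldl_nil]
  rfl

theorem pvTerms_append_singleton (x : List Int) (l : List Int) (v : Int) (k : Nat) :
    pvTerms x (l ++ [v]) k =
      pvTerms x l k ++
        (if PySem.Int.toStr v == "0" then []
         else [PySem.Int.toStr v ++ pvCat ((x.take (k + l.length)).map pvFactor)]) := by
  induction l generalizing k with
  | nil => simp [pvTerms]
  | cons a r ih =>
    simp only [List.cons_append, pvTerms, ih (k + 1), List.length_cons, List.append_assoc]
    ring_nf

-- A's inner loop appends exactly the first n factor strings
theorem pvInnerA (x : List Int) (n : Nat) (hn : n ≤ x.length) (s : String) :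
    (PySem.List.pyRange 0 (n : Int) 1).foldl (fun curr j =>
        let t := PySem.Int.toStr (PySem.List.pyGetD x j 0)
        if t == "0" then curr ++ "(x)"
        else if PySem.Str.isIn "-" t then curr ++ "(x + " ++ PySem.Str.replace t "-" "" ++ ")"
        else curr ++ "(x - " ++ t ++ ")") s
      = s ++ pvCat ((x.take n).map pvFactor) := by
  induction n generalizing s with
  | zero =>
    rw [show ((0 : Nat) : Int) = 0 from rfl, PySem.List.pyRange_one_eq_nil le_rfl]
    simp [pvCat]
  | succ m ih =>
    have hm : m ≤ x.length := Nat.le_of_succ_le hn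
    have hcast : ((m + 1 : Nat) : Int) = (m : Int) + 1 := by push_cast; ring
    rw [hcast, PySem.List.pyRange_one_succ_right (a := 0) (b := (m : Int)) (by positivity),
      List.foldl_append, ih hm]
    have hlt : m < x.length := hn
    have htake : x.take (m + 1) = x.take m ++ [x[m]] := by
      rw [List.take_add_one]; simp [List.getElem?_eq_getElem hlt]
    rw [htake]
    simp only [List.foldl_cons, List.foldl_nil, List.map_append, List.map_cons, List.map_nil,
      pvCat_append, PySem.List.pyGetD_natCast, List.getD_eq_getElem _ _ hlt]
    rw [pvFactor]
    split_ifs <;> simp [String.append_assoc]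

-- A's outer loop over the first m coefficients produces the reference term list
theorem pvOuterA (c x : List Int) (hpre : Pre_get_polynomial_str c x) (m : Nat)
    (hm : m ≤ c.length) :
    (PySem.List.pyRange 0 (m : Int) 1).foldl (fun ans i =>
        let curr := PySem.Int.toStr (PySem.List.pyGetD c i 0)
        if curr == "0" then ans
        else
          let curr := (PySem.List.pyRange 0 i 1).foldl (fun curr j =>
            let t := PySem.Int.toStr (PySem.List.pyGetD x j 0)
            if t == "0" then curr ++ "(x)"
            else if PySem.Str.isIn "-" t then curr ++ "(x + " ++ PySem.Str.replace t "-" "" ++ ")"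
            else curr ++ "(x - " ++ t ++ ")") curr
          ans ++ [curr]) []
      = pvTerms x (c.take m) 0 := by
  induction m with
  | zero =>
    rw [show ((0 : Nat) : Int) = 0 from rfl, PySem.List.pyRange_one_eq_nil le_rfl]
    simp [pvTerms]
  | succ m ih =>
    have hm' : m ≤ c.length := Nat.le_of_succ_le hm
    have hlt : m < c.length := hm
    have hcast : ((m + 1 : Nat) : Int) = (m : Int) + 1 := by push_cast; ring
    rw [hcast, PySem.List.pyRange_one_succ_right (a := 0) (b := (m : Int)) (by positivity),
      List.foldl_append, ih hm']
    have htake : c.take (m + 1) = c.take m ++ [c.getD m 0] := by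
      rw [List.take_add_one]
      simp [List.getElem?_eq_getElem hlt]
    rw [htake, pvTerms_append_singleton]
    simp only [List.foldl_cons, List.foldl_nil, PySem.List.pyGetD_natCast,
      List.length_take, Nat.zero_add, Nat.min_eq_left hm']
    by_cases h0 : (PySem.Int.toStr (c.getD m 0) == "0") = true
    · rw [if_pos h0, if_pos h0, List.append_nil]
    · have hne : c.getD m 0 ≠ 0 := by
        intro hz
        rw [hz] at h0
        exact h0 (by decide)
      have hx : m ≤ x.length := hpre m hlt hne
      rw [if_neg h0, if_neg h0, pvInnerA x m hx]

-- B's single pass: the running prefix equals the concatenation of the first k factor strings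
theorem pvFoldB (x : List Int) (c' : List Int) (k : Nat) (terms0 : List String) :
    ((PySem.List.enumerate c' (k : Int)).foldl (fun (st : List String × String) p =>
        let s := PySem.Int.toStr p.2
        let terms := if s == "0" then st.1 else st.1 ++ [s ++ st.2]
        let prefx := if p.1 < (x.length : Int) then st.2 ++ pvFactor (PySem.List.pyGetD x p.1 0) else st.2
        (terms, prefx)) (terms0, pvCat ((x.take k).map pvFactor))).1
      = terms0 ++ pvTerms x c' k := by
  induction c' generalizing k terms0 with
  | nil => simp [PySem.List.enumerate_nil, pvTerms]
  | cons v r ih =>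
    rw [PySem.List.enumerate_cons]
    simp only [List.foldl_cons]
    have hpref : (if (k : Int) < (x.length : Int) then
          pvCat ((x.take k).map pvFactor) ++ pvFactor (PySem.List.pyGetD x (k : Int) 0)
        else pvCat ((x.take k).map pvFactor))
        = pvCat ((x.take (k + 1)).map pvFactor) := by
      by_cases hk : k < x.length
      · have htake : x.take (k + 1) = x.take k ++ [x[k]] := by
          rw [List.take_add_one]; simp [List.getElem?_eq_getElem hk]
        rw [if_pos (show (k : Int) < (x.length : Int) by exact_mod_cast hk), htake,
          List.map_append, List.map_cons, List.map_nil, pvCat_append,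
          PySem.List.pyGetD_natCast, List.getD_eq_getElem _ _ hk]
      · have hge : x.length ≤ k := Nat.le_of_not_lt hk
        rw [if_neg (by exact_mod_cast hk), List.take_of_length_le hge,
          List.take_of_length_le (Nat.le_succ_of_le hge)]
    have hcast : (k : Int) + 1 = ((k + 1 : Nat) : Int) := by push_cast; ring
    by_cases h0 : PySem.Int.toStr v == "0"
    · simp only [h0, if_pos, hpref, hcast, ih (k + 1) terms0]
      simp [pvTerms, h0]
    · simp only [h0, Bool.false_eq_true, if_false, hpref, hcast,
        ih (k + 1) (terms0 ++ [PySem.Int.toStr v ++ pvCat ((x.take k).map pvFactor)])]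
      simp [pvTerms, h0]

-- ===== VERDICT (by name: the statement is the Claim_ definition above) =====
theorem get_polynomial_str_spec : Claim_equal_get_polynomial_str := by
  intro c x _hdom hpre
  unfold Spec_get_polynomial_str get_polynomial_str get_polynomial_str_alt
  have hA := pvOuterA c x hpre c.length (Nat.le_refl _)
  rw [List.take_length] at hA
  have hB := pvFoldB x c 0 []
  simp only [Nat.cast_zero, List.take_zero, List.map_nil] at hB
  have hB' := hB
  rw [show pvCat [] = "" from rfl] at hB'
  simp only [hA]
  rw [show (PySem.List.enumerate c : List (Int × Int)) = PySem.List.enumerate c (0 : Int) from rfl]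
  rw [hB']
  simp
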